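-- pv_equiv track=rewrite | github.com/Kvkthecreator/yarnnnn | api/services/invocation_dispatcher.py | _extract_recent_feedback
-- ===== SOURCE A (Python) =====
-- def _extract_recent_feedback(feedback_md: str, max_entries: int = 3) -> str:
--     """Extract the last N feedback entries from feedback.md.
--
--     Mirrors task_pipeline._extract_recent_feedback shape; ports here so
--     the dispatcher is self-contained when task_pipeline.py dies in 3.7.
--     """
--     if not feedback_md:
--         return ""
--     blocks = []
--     current: list[str] = []
--     for line in feedback_md.splitlines():
--         if line.startswith("## "):
--             if current:
--                 blocks.append("\n".join(current))
--             current = [line]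
--         else:
--             if current:
--                 current.append(line)
--     if current:
--         blocks.append("\n".join(current))
--     if not blocks:
--         return feedback_md.strip()
--     return "\n\n".join(blocks[-max_entries:])
-- ===== SOURCE B (Python) =====
-- def _blocks(lines):
--     """lines is empty or starts with a header line; split it at header lines."""
--     if not lines:
--         return []
--     end = 1
--     while end < len(lines) and not lines[end].startswith("## "):
--         end += 1
--     return ["\n".join(lines[:end])] + _blocks(lines[end:])
--
--
-- def _extract_recent_feedback(feedback_md: str, max_entries: int = 3) -> str:
--     if not feedback_md:
--         return ""
--     lines = feedback_md.splitlines()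
--     start = next((i for i, l in enumerate(lines) if l.startswith("## ")), None)
--     if start is None:
--         return feedback_md.strip()
--     return "\n\n".join(_blocks(lines[start:])[-max_entries:])
-- ===== Notes on version B (the rewrite author's own statement) =====
-- stated objective: alternative
-- what changed: Replaces A's single accumulator loop over lines (blocks/current state machine) with a two-phase decomposition: find the first header line, drop the preamble, then split the remainder into blocks by span-style recursion at header lines.
import Mathlib
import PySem

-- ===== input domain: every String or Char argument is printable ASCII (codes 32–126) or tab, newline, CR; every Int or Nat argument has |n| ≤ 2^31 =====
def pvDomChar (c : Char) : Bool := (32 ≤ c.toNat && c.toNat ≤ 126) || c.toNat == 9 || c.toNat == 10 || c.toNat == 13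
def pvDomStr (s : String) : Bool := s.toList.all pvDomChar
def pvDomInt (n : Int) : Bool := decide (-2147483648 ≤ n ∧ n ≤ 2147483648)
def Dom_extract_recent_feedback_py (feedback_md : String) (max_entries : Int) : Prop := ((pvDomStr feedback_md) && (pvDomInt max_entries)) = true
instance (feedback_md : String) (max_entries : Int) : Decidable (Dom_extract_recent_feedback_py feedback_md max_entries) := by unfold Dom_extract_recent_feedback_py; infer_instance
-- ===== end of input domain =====

-- B replaces A's blocks/current accumulator loop by a two-phase decomposition:
-- find the first header, drop the preamble, then split the rest into blocks by
-- span-recursion at header lines (objective: alternative; same O(n) cost).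

-- ===== PORT A =====
-- the loop body of A: state is (blocks, current)
def pvStepA (st : List String × List String) (line : String) : List String × List String :=
  if PySem.Str.startswith line "## " then
    ((if st.2 ≠ [] then st.1 ++ [PySem.Str.join "\n" st.2] else st.1), [line])
  else
    (st.1, if st.2 ≠ [] then st.2 ++ [line] else st.2)

-- the trailing "if current: blocks.append(...)" after the loop
def pvFinA (st : List String × List String) : List String :=
  if st.2 ≠ [] then st.1 ++ [PySem.Str.join "\n" st.2] else st.1

def extract_recent_feedback_py (feedback_md : String) (max_entries : Int) : String :=
  if feedback_md == "" then ""
  else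
    let blocks := pvFinA ((PySem.Str.splitlines feedback_md).foldl pvStepA ([], []))
    if blocks == [] then PySem.Str.strip feedback_md
    else PySem.Str.join "\n\n" (PySem.List.slice blocks (some (-max_entries)) none)

-- ===== PORT B =====
def pvIsHdr (l : String) : Bool := PySem.Str.startswith l "## "

-- _blocks: input is empty or starts with a header; span off the body, recurse
def pvBlocksB : List String → List String
  | [] => []
  | l :: rest =>
    PySem.Str.join "\n" (l :: rest.takeWhile (fun x => !pvIsHdr x))
      :: pvBlocksB (rest.dropWhile (fun x => !pvIsHdr x))
termination_by ls => ls.length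
decreasing_by
  simp only [List.length_cons]
  exact Nat.lt_succ_of_le (List.length_dropWhile_le _ _)

def extract_recent_feedback_py_alt (feedback_md : String) (max_entries : Int) : String :=
  if feedback_md == "" then ""
  else
    let lines := PySem.Str.splitlines feedback_md
    match lines.findIdx? pvIsHdr with
    | none => PySem.Str.strip feedback_md
    | some start =>
        PySem.Str.join "\n\n"
          (PySem.List.slice (pvBlocksB (lines.drop start)) (some (-max_entries)) none)

-- ===== PRECONDITION & SPEC =====
def Spec_extract_recent_feedback_py (feedback_md : String) (max_entries : Int) (out : String) : Prop := out = extract_recent_feedback_py_alt feedback_md max_entries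
instance (feedback_md : String) (max_entries : Int) (out : String) : Decidable (Spec_extract_recent_feedback_py feedback_md max_entries out) := by unfold Spec_extract_recent_feedback_py; infer_instance

-- ===== CLAIM (what is proved, stated in full; the proofs are below) =====
def Claim_equal_extract_recent_feedback_py : Prop := ∀ (feedback_md : String) (max_entries : Int), Dom_extract_recent_feedback_py feedback_md max_entries → Spec_extract_recent_feedback_py feedback_md max_entries (extract_recent_feedback_py feedback_md max_entries)

-- ===== LEMMAS AND PROOFS =====

-- A's loop from a nonempty `current`: one block closes cur ++ span-body, rest per pvBlocksB
theorem pvFoldA_cons (ls : List String) : ∀ (blocks cur : List String), cur ≠ [] →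
    pvFinA (ls.foldl pvStepA (blocks, cur)) =
      blocks ++ (PySem.Str.join "\n" (cur ++ ls.takeWhile (fun x => !pvIsHdr x))
                  :: pvBlocksB (ls.dropWhile (fun x => !pvIsHdr x))) := by
  induction ls with
  | nil => intro blocks cur hc; simp [pvFinA, pvBlocksB, hc]
  | cons l ls ih =>
    intro blocks cur hc
    by_cases h : pvIsHdr l
    · have hstep : pvStepA (blocks, cur) l = (blocks ++ [PySem.Str.join "\n" cur], [l]) := by
        simp [pvStepA, pvIsHdr] at h ⊢; simp [h, hc]
      rw [List.foldl_cons, hstep, ih _ [l] (by simp)]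
      simp [h, pvBlocksB]
    · have hstep : pvStepA (blocks, cur) l = (blocks, cur ++ [l]) := by
        simp [pvStepA, pvIsHdr] at h ⊢; simp [h, hc]
      rw [List.foldl_cons, hstep, ih _ (cur ++ [l]) (by simp)]
      simp [h]

-- A's loop from the empty `current`: the preamble is dropped
theorem pvFoldA_nil (ls : List String) : ∀ (blocks : List String),
    pvFinA (ls.foldl pvStepA (blocks, [])) =
      blocks ++ pvBlocksB (ls.dropWhile (fun x => !pvIsHdr x)) := by
  induction ls with
  | nil => intro blocks; simp [pvFinA, pvBlocksB]
  | cons l ls ih =>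
    intro blocks
    by_cases h : pvIsHdr l
    · have hstep : pvStepA (blocks, []) l = (blocks, [l]) := by
        simp [pvStepA, pvIsHdr] at h ⊢; simp [h]
      rw [List.foldl_cons, hstep, pvFoldA_cons ls blocks [l] (by simp)]
      simp [h, pvBlocksB]
    · have hstep : pvStepA (blocks, []) l = (blocks, []) := by
        simp [pvStepA, pvIsHdr] at h ⊢; simp [h]
      rw [List.foldl_cons, hstep, ih blocks]
      simp [h]

-- findIdx? versus dropWhile on the same predicate
theorem pvFindDrop (ls : List String) :
    (ls.findIdx? pvIsHdr = none ∧ ls.dropWhile (fun x => !pvIsHdr x) = []) ∨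
    (∃ i, ls.findIdx? pvIsHdr = some i ∧
      ls.drop i = ls.dropWhile (fun x => !pvIsHdr x) ∧
      ls.dropWhile (fun x => !pvIsHdr x) ≠ []) := by
  induction ls with
  | nil => left; simp
  | cons l ls ih =>
    by_cases h : pvIsHdr l
    · right; exact ⟨0, by simp [List.findIdx?_cons, h]⟩
    · rcases ih with ⟨hn, hd⟩ | ⟨i, hs, hd, hne⟩
      · left; simp [List.findIdx?_cons, h, hn, hd]
      · right; exact ⟨i + 1, by simp [List.findIdx?_cons, h, hs, hd, hne]⟩

-- ===== VERDICT (by name: the statement is the Claim_ definition above) =====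
theorem extract_recent_feedback_py_spec : Claim_equal_extract_recent_feedback_py := by
  intro fm n _
  unfold Spec_extract_recent_feedback_py extract_recent_feedback_py extract_recent_feedback_py_alt
  by_cases he : fm == ""
  · simp [he]
  · simp only [he]
    have hA := pvFoldA_nil (PySem.Str.splitlines fm) []
    simp only [List.nil_append] at hA
    rcases pvFindDrop (PySem.Str.splitlines fm) with ⟨hn, hd⟩ | ⟨i, hs, hd, hne⟩
    · simp [hA, hd, hn, pvBlocksB]
    · rw [hs]
      have hblocks : pvFinA ((PySem.Str.splitlines fm).foldl pvStepA ([], [])) =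
          pvBlocksB ((PySem.Str.splitlines fm).drop i) := by rw [hA, hd]
      have hbne : pvBlocksB ((PySem.Str.splitlines fm).drop i) ≠ [] := by
        rw [hd]
        cases hcase : (PySem.Str.splitlines fm).dropWhile (fun x => !pvIsHdr x) with
        | nil => exact absurd hcase hne
        | cons a t => simp [pvBlocksB]
      simp only [hblocks]
      simp [hbne]
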